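-- pv_equiv track=rewrite | github.com/Zombiesama18/Leetcode_Python | Leetcode/Leetcode_招商银行-01. 文本编辑程序设计.py | deleteText
-- ===== SOURCE A (Python) =====
-- def deleteText(article: str, index: int) -> str:
--     if article[index] == ' ':
--         return article
--     words = []
--     counter = 0
--     for word in article.split(' '):
--         if not counter <= index <= counter + len(word):
--             words.append(word)
--         counter += len(word) + 1
--     return ' '.join(words)
-- ===== SOURCE B (Python) =====
-- def deleteText(article: str, index: int) -> str:
--     if index < 0:
--         return article
--     if article[index] == ' ':
--         return article
--     left = index
--     while left > 0 and article[left - 1] != ' ':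
--         left -= 1
--     right = index
--     while right < len(article) and article[right] != ' ':
--         right += 1
--     if left > 0:
--         return article[:left - 1] + article[right:]
--     if right < len(article):
--         return article[right + 1:]
--     return ''
-- ===== Notes on version B (the rewrite author's own statement) =====
-- stated objective: alternative
-- what changed: A splits the text into words, tracks a cumulative counter over all words and rejoins the kept ones; B scans outward from index for the word's two space boundaries and splices the string with one take/drop, touching only the affected word's neighbourhood instead of rebuilding the whole word list.
import Mathlib
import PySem

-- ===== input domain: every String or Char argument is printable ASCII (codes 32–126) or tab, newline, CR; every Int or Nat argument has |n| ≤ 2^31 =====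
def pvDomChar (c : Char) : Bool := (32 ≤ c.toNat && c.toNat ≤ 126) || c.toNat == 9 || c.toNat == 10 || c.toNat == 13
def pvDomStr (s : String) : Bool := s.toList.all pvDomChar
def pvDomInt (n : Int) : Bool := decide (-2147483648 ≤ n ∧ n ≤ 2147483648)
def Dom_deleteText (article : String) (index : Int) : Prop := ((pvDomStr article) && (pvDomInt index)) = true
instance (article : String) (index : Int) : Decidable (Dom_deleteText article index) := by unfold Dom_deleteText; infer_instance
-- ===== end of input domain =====

-- B replaces A's split/cumulative-counter/rejoin by a boundary scan from `index` plus a single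
-- take/drop splice; same O(n) cost, different algorithm (objective: alternative).


-- ===== PORT A =====
-- literal transliteration of A: guard on article[index], then split(' '), a foldl carrying
-- (words, counter), finally ' '.join(words)
def deleteText (article : String) (index : Int) : String :=
  match PySem.Str.pyGet? article index with
  | none => ""          -- article[index] raises IndexError; excluded by Pre_
  | some ch =>
    if ch = ' ' then article
    else
      match PySem.Str.split? article " " with
      | none => ""      -- unreachable: the separator " " is nonempty
      | some ws =>
        let st := ws.foldl (fun (st : List String × Int) (word : String) =>
          (if ¬ (st.2 ≤ index ∧ index ≤ st.2 + (PySem.Str.len word : Int)) then st.1 ++ [word]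
           else st.1,
           st.2 + (PySem.Str.len word : Int) + 1)) ([], 0)
        PySem.Str.join " " st.1

-- ===== PORT B =====
-- `while left > 0 and article[left-1] != ' ': left -= 1`
def pvFindLeftB (L : List Char) : Nat → Nat
  | 0 => 0
  | l + 1 => if L[l]? = some ' ' then l + 1 else pvFindLeftB L l

-- `while right < len(article) and article[right] != ' ': right += 1`
def pvFindRightB (L : List Char) (r : Nat) : Nat :=
  if h : r < L.length then
    if L[r] = ' ' then r else pvFindRightB L (r + 1)
  else r
termination_by L.length - r

def deleteText_alt (article : String) (index : Int) : String :=
  if index < 0 then article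
  else
    match PySem.Str.pyGet? article index with
    | none => ""        -- article[index] raises IndexError; excluded by Pre_
    | some ch =>
      if ch = ' ' then article
      else
        let L := article.toList
        let left := pvFindLeftB L index.toNat
        let right := pvFindRightB L index.toNat
        if 0 < left then String.ofList (L.take (left - 1) ++ L.drop right)
        else if right < L.length then String.ofList (L.drop (right + 1))
        else ""

-- ===== PRECONDITION & SPEC =====
-- Pre_ excludes exactly the inputs where article[index] raises IndexError in A.
def Pre_deleteText (article : String) (index : Int) : Prop :=
  -(article.toList.length : Int) ≤ index ∧ index < (article.toList.length : Int)
instance (article : String) (index : Int) : Decidable (Pre_deleteText article index) := by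
  unfold Pre_deleteText; infer_instance

def pvWitness_deleteText : String × Int := ("ab cd", 3)

def Spec_deleteText (article : String) (index : Int) (out : String) : Prop := out = deleteText_alt article index
instance (article : String) (index : Int) (out : String) : Decidable (Spec_deleteText article index out) := by unfold Spec_deleteText; infer_instance

-- ===== CLAIM (what is proved, stated in full; the proofs are below) =====
def Claim_equal_deleteText : Prop := ∀ (article : String) (index : Int), Dom_deleteText article index → Pre_deleteText article index → Spec_deleteText article index (deleteText article index)

-- ===== LEMMAS AND PROOFS =====

-- the list of words A keeps, with the running counter as a parameter
def pvKeptS (index : Int) : List String → Int → List String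
  | [], _ => []
  | w :: ws, k =>
    (if ¬ (k ≤ index ∧ index ≤ k + (PySem.Str.len w : Int)) then [w] else []) ++
      pvKeptS index ws (k + (PySem.Str.len w : Int) + 1)

-- char-level mirror of pvKeptS
def pvKeptW (index : Int) : List (List Char) → Int → List (List Char)
  | [], _ => []
  | w :: ws, k =>
    (if ¬ (k ≤ index ∧ index ≤ k + (w.length : Int)) then [w] else []) ++
      pvKeptW index ws (k + (w.length : Int) + 1)

-- B's core value at char level (the non-guard branch)
def pvBCore (L : List Char) (i : Nat) : List Char :=
  let left := pvFindLeftB L i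
  let right := pvFindRightB L i
  if 0 < left then L.take (left - 1) ++ L.drop right
  else if right < L.length then L.drop (right + 1)
  else []

theorem pvFoldA (index : Int) (ws : List String) (acc : List String) (k : Int) :
    (ws.foldl (fun (st : List String × Int) (word : String) =>
      (if ¬ (st.2 ≤ index ∧ index ≤ st.2 + (PySem.Str.len word : Int)) then st.1 ++ [word]
       else st.1,
       st.2 + (PySem.Str.len word : Int) + 1)) (acc, k)).1 = acc ++ pvKeptS index ws k := by
  induction ws generalizing acc k with
  | nil => simp [pvKeptS]
  | cons w ws ih =>
    simp only [List.foldl_cons]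
    rw [ih]
    simp only [pvKeptS]
    split_ifs <;> simp

theorem pvKeptSW (index : Int) (ws : List String) (k : Int) :
    (pvKeptS index ws k).map String.toList = pvKeptW index (ws.map String.toList) k := by
  induction ws generalizing k with
  | nil => simp [pvKeptS, pvKeptW]
  | cons w ws ih =>
    simp only [pvKeptS, pvKeptW, List.map_cons, PySem.Str.len_eq]
    split_ifs <;> simp [ih]

theorem pvKept_all (index : Int) (ws : List (List Char)) (k : Int) (h : index < k) :
    pvKeptW index ws k = ws := by
  induction ws generalizing k with
  | nil => rfl
  | cons w ws ih =>
    have h1 : ¬ (k ≤ index ∧ index ≤ k + (w.length : Int)) := by omega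
    rw [pvKeptW, ih _ (by omega)]
    simp [h1]

theorem pvKept_shift (index : Int) (ws : List (List Char)) (k d : Int) :
    pvKeptW index ws (k + d) = pvKeptW (index - d) ws k := by
  induction ws generalizing k with
  | nil => rfl
  | cons w ws ih =>
    have h1 : (k + d ≤ index ∧ index ≤ k + d + (w.length : Int)) ↔
        (k ≤ index - d ∧ index - d ≤ k + (w.length : Int)) := by omega
    simp only [pvKeptW]
    rw [show k + d + (w.length : Int) + 1 = (k + (w.length : Int) + 1) + d by ring, ih]
    by_cases h : k ≤ index - d ∧ index - d ≤ k + (w.length : Int)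
    · rw [if_neg (by simp [h1.mpr h]), if_neg (by simp [h])]
    · rw [if_pos (by simpa using fun hc => h (h1.mp hc)), if_pos (by simpa using h)]

theorem pvKept_length (index : Int) (ws : List (List Char)) (k : Int) :
    ws.length ≤ (pvKeptW index ws k).length + 1 := by
  induction ws generalizing k with
  | nil => simp
  | cons w ws ih =>
    by_cases h : k ≤ index ∧ index ≤ k + (w.length : Int)
    · have := pvKept_all index ws (k + (w.length : Int) + 1) (by omega)
      simp [pvKeptW, h, this]
    · have := ih (k + (w.length : Int) + 1)
      simp only [pvKeptW, h, not_false_iff, if_true]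
      simp at this ⊢
      omega

-- PySem's splitOn on a one-char separator is core List.splitOn
theorem pvModifyHead_id {α : Type} (l : List α) : l.modifyHead (fun x => x) = l := by
  cases l <;> rfl

theorem pvSplitGo (c : Char) (fuel : Nat) (l cur : List Char) (acc : List (List Char))
    (h : l.length < fuel) :
    PySem.Chars.splitOn.go [c] fuel l cur acc =
      acc.reverse ++ (List.splitOn c l).modifyHead (cur.reverse ++ ·) := by
  induction fuel generalizing l cur acc with
  | zero => omega
  | succ fuel ih =>
    cases l with
    | nil => simp [PySem.Chars.splitOn.go, List.splitOn, List.splitOnP_nil]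
    | cons a rest =>
      by_cases hc : c = a
      · subst hc
        rw [show PySem.Chars.splitOn.go [c] (fuel + 1) (c :: rest) cur acc =
            PySem.Chars.splitOn.go [c] fuel (List.drop 1 (c :: rest)) []
              (cur.reverse :: acc) by
          simp [PySem.Chars.splitOn.go, List.isPrefixOf]]
        rw [ih _ _ _ (by simpa using Nat.lt_of_succ_lt_succ h)]
        simp only [List.splitOn, List.splitOnP_cons, beq_self_eq_true, if_true,
          List.drop_succ_cons, List.drop_zero, List.modifyHead_cons, List.reverse_cons]
        simp [pvModifyHead_id]
      · have hne : (c == a) = false := by simpa using hc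
        have hne' : (a == c) = false := by simpa using fun e => hc e.symm
        rw [show PySem.Chars.splitOn.go [c] (fuel + 1) (a :: rest) cur acc =
            PySem.Chars.splitOn.go [c] fuel rest (a :: cur) acc by
          simp [PySem.Chars.splitOn.go, List.isPrefixOf, hne]]
        rw [ih _ _ _ (by simpa using Nat.lt_of_succ_lt_succ h)]
        have hfun : (fun x => (a :: cur).reverse ++ x) =
            ((fun x => cur.reverse ++ x) ∘ (List.cons a)) := by
          funext x; simp
        rw [hfun]
        simp [List.splitOn, List.splitOnP_cons, hne', List.modifyHead_modifyHead]

theorem pvSplit_eq (c : Char) (L : List Char) :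
    PySem.Chars.splitOn L [c] = List.splitOn c L := by
  rw [PySem.Chars.splitOn, pvSplitGo c (L.length + 1) L [] [] (by omega)]
  simp [pvModifyHead_id]

theorem pvSplitOn_no (c : Char) (l : List Char) (h : c ∉ l) : List.splitOn c l = [l] := by
  induction l with
  | nil => simp [List.splitOn, List.splitOnP_nil]
  | cons a l ih =>
    have ha : (a == c) = false := by simp; rintro rfl; exact h List.mem_cons_self
    simp only [List.splitOn, List.splitOnP_cons, ha] at *
    rw [ih (fun hc => h (List.mem_cons_of_mem _ hc))]
    rfl

theorem pvSplitOn_ne_nil (c : Char) (l : List Char) : List.splitOn c l ≠ [] := by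
  induction l with
  | nil => simp [List.splitOn, List.splitOnP_nil]
  | cons a l ih =>
    simp only [List.splitOn, List.splitOnP_cons] at *
    split <;> simp [ih, List.modifyHead_eq_nil_iff]

theorem pvSplitOn_app (c : Char) (w rest : List Char) (h : c ∉ w) :
    List.splitOn c (w ++ c :: rest) = w :: List.splitOn c rest := by
  induction w with
  | nil => simp [List.splitOn, List.splitOnP_cons]
  | cons a w ih =>
    have ha : (a == c) = false := by simp; rintro rfl; exact h List.mem_cons_self
    simp only [List.cons_append, List.splitOn, List.splitOnP_cons, ha] at *
    rw [ih (fun hc => h (List.mem_cons_of_mem _ hc))]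
    rfl

-- specification of the two boundary scans
theorem pvFL_le (L : List Char) (i : Nat) : pvFindLeftB L i ≤ i := by
  induction i with
  | zero => simp [pvFindLeftB]
  | succ l ih =>
    by_cases h : L[l]? = some ' '
    · simp [pvFindLeftB, h]
    · simp [pvFindLeftB, h]; omega

theorem pvFL_no_space (L : List Char) (i : Nat) :
    ∀ j, pvFindLeftB L i ≤ j → j < i → L[j]? ≠ some ' ' := by
  induction i with
  | zero => omega
  | succ l ih =>
    intro j h1 h2
    by_cases h : L[l]? = some ' '
    · simp [pvFindLeftB, h] at h1; omega
    · simp only [pvFindLeftB, h, if_false] at h1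
      rcases Nat.lt_or_ge j l with hj | hj
      · exact ih j h1 hj
      · have : j = l := by omega
        subst this; exact h

theorem pvFL_boundary (L : List Char) (i : Nat) :
    pvFindLeftB L i = 0 ∨ L[pvFindLeftB L i - 1]? = some ' ' := by
  induction i with
  | zero => left; rfl
  | succ l ih =>
    by_cases h : L[l]? = some ' '
    · right; simp [pvFindLeftB, h]
    · simpa [pvFindLeftB, h] using ih

theorem pvFL_uniq (L : List Char) (i : Nat) (r : Nat) (h1 : r ≤ i)
    (h2 : ∀ j, r ≤ j → j < i → L[j]? ≠ some ' ')
    (h3 : r = 0 ∨ L[r - 1]? = some ' ') : pvFindLeftB L i = r := by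
  rcases Nat.lt_trichotomy (pvFindLeftB L i) r with h | h | h
  · rcases h3 with h3 | h3
    · omega
    · exact absurd h3 (pvFL_no_space L i (r - 1) (by omega) (by omega))
  · exact h
  · rcases pvFL_boundary L i with hb | hb
    · omega
    · have hle := pvFL_le L i
      exact absurd hb (h2 (pvFindLeftB L i - 1) (by omega) (by omega))

theorem pvFR_aux (L : List Char) : ∀ (fuel r : Nat), L.length ≤ r + fuel →
    (r ≤ pvFindRightB L r ∧ pvFindRightB L r ≤ max r L.length) ∧
    (∀ j, r ≤ j → j < pvFindRightB L r → L[j]? ≠ some ' ') ∧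
    (L.length ≤ pvFindRightB L r ∨ L[pvFindRightB L r]? = some ' ') := by
  intro fuel
  induction fuel with
  | zero =>
    intro r hr
    rw [pvFindRightB, dif_neg (by omega)]
    exact ⟨⟨le_refl r, le_max_left _ _⟩, fun j h1 h2 => absurd h2 (by omega), Or.inl (by omega)⟩
  | succ fuel ih =>
    intro r hr
    by_cases hlt : r < L.length
    · by_cases hsp : L[r]'hlt = ' '
      · rw [pvFindRightB, dif_pos hlt, if_pos hsp]
        exact ⟨⟨le_refl r, le_max_left _ _⟩, fun j h1 h2 => absurd h2 (by omega),
          Or.inr (by rw [List.getElem?_eq_getElem hlt, hsp])⟩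
      · rw [pvFindRightB, dif_pos hlt, if_neg hsp]
        obtain ⟨⟨g1, g2⟩, g3, g4⟩ := ih (r + 1) (by omega)
        refine ⟨⟨by omega, by omega⟩, ?_, g4⟩
        intro j h1 h2
        rcases Nat.lt_or_ge j (r + 1) with hj | hj
        · have : j = r := by omega
          subst this
          rw [List.getElem?_eq_getElem hlt]
          simp [hsp]
        · exact g3 j hj h2
    · rw [pvFindRightB, dif_neg hlt]
      exact ⟨⟨le_refl r, le_max_left _ _⟩, fun j h1 h2 => absurd h2 (by omega), Or.inl (by omega)⟩

theorem pvFR_ge (L : List Char) (r : Nat) : r ≤ pvFindRightB L r :=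
  ((pvFR_aux L L.length r (by omega)).1).1

theorem pvFR_le (L : List Char) (r : Nat) (h : r ≤ L.length) : pvFindRightB L r ≤ L.length := by
  have := ((pvFR_aux L L.length r (by omega)).1).2
  omega

theorem pvFR_no_space (L : List Char) (r : Nat) :
    ∀ j, r ≤ j → j < pvFindRightB L r → L[j]? ≠ some ' ' :=
  (pvFR_aux L L.length r (by omega)).2.1

theorem pvFR_boundary (L : List Char) (r : Nat) (h : r ≤ L.length) :
    pvFindRightB L r = L.length ∨ L[pvFindRightB L r]? = some ' ' := by
  rcases (pvFR_aux L L.length r (by omega)).2.2 with h1 | h1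
  · left; have := pvFR_le L r h; omega
  · right; exact h1

theorem pvFR_uniq (L : List Char) (i : Nat) (hi : i ≤ L.length) (r : Nat) (h1 : i ≤ r)
    (h1' : r ≤ L.length)
    (h2 : ∀ j, i ≤ j → j < r → L[j]? ≠ some ' ')
    (h3 : r = L.length ∨ L[r]? = some ' ') : pvFindRightB L i = r := by
  rcases Nat.lt_trichotomy (pvFindRightB L i) r with h | h | h
  · rcases pvFR_boundary L i hi with hb | hb
    · omega
    · exact absurd hb (h2 _ (pvFR_ge L i) h)
  · exact h
  · rcases h3 with h3 | h3
    · have := pvFR_le L i hi; omega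
    · exact absurd h3 (pvFR_no_space L i r h1 h)

-- main equivalence at char level
theorem pvDecomp (L : List Char) (h : ' ' ∈ L) :
    ∃ w rest, ' ' ∉ w ∧ L = w ++ ' ' :: rest := by
  induction L with
  | nil => cases h
  | cons a l ih =>
    by_cases ha : a = ' '
    · exact ⟨[], l, by simp, by simp [ha]⟩
    · have hl : ' ' ∈ l := by
        rcases List.mem_cons.mp h with h | h
        · exact absurd h.symm ha
        · exact h
      obtain ⟨w, rest, hw, rfl⟩ := ih hl
      exact ⟨a :: w, rest, by simp [hw]; exact fun e => ha e.symm, by simp⟩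

theorem pvNoMem (L : List Char) (h : ∀ j, j < L.length → L[j]? ≠ some ' ') : ' ' ∉ L := by
  intro hm
  obtain ⟨j, hj, he⟩ := List.getElem_of_mem hm
  exact h j hj (by rw [List.getElem?_eq_getElem hj, he])

theorem pvMainAux : ∀ (n : Nat) (L : List Char) (i : Nat), L.length ≤ n → i < L.length →
    L[i]? ≠ some ' ' →
    PySem.Chars.join [' '] (pvKeptW (i : Int) (List.splitOn ' ' L) 0) = pvBCore L i := by
  intro n
  induction n with
  | zero => intro L i h1 h2 _; omega
  | succ n ih =>
    intro L i hlen hi hsp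
    by_cases hmem : ' ' ∈ L
    · obtain ⟨w, rest, hw, rfl⟩ := pvDecomp L hmem
      have hgetw : ∀ j, j < w.length → (w ++ ' ' :: rest)[j]? ≠ some ' ' := by
        intro j hj hsome
        rw [List.getElem?_append_left hj] at hsome
        exact hw (List.mem_of_getElem? hsome)
      have hgetm : (w ++ ' ' :: rest)[w.length]? = some ' ' := by
        rw [List.getElem?_append_right (le_refl _)]
        simp
      have hgetr : ∀ j, (w ++ ' ' :: rest)[w.length + 1 + j]? = rest[j]? := by
        intro j
        rw [List.getElem?_append_right (by omega)]
        rw [show w.length + 1 + j - w.length = j + 1 by omega]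
        simp
      have hL : (w ++ ' ' :: rest).length = w.length + 1 + rest.length := by
        simp; omega
      have hsplit : List.splitOn ' ' (w ++ ' ' :: rest) = w :: List.splitOn ' ' rest :=
        pvSplitOn_app ' ' w rest hw
      rcases Nat.lt_trichotomy i w.length with hcase | hcase | hcase
      · -- the word containing `index` is the first one
        have hA : pvKeptW (i : Int) (w :: List.splitOn ' ' rest) 0 = List.splitOn ' ' rest := by
          simp only [pvKeptW]
          rw [if_neg (by push_cast; omega)]
          rw [pvKept_all _ _ _ (by push_cast; omega)]
          simp
        have hjoin : PySem.Chars.join [' '] (List.splitOn ' ' rest) = rest :=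
          List.intercalate_splitOn rest ' '
        rw [hsplit, hA, hjoin]
        have hleft : pvFindLeftB (w ++ ' ' :: rest) i = 0 :=
          pvFL_uniq _ _ 0 (Nat.zero_le _) (fun j _ hj => hgetw j (by omega)) (Or.inl rfl)
        have hright : pvFindRightB (w ++ ' ' :: rest) i = w.length :=
          pvFR_uniq _ _ (by omega) w.length (by omega) (by omega)
            (fun j _ h2 => hgetw j h2) (Or.inr hgetm)
        simp only [pvBCore, hleft, hright]
        rw [if_neg (by omega), if_pos (by omega)]
        rw [List.drop_append, List.drop_eq_nil_of_le (by omega),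
          show w.length + 1 - w.length = 1 by omega]
        simp
      · exact absurd (hcase ▸ hgetm) hsp
      · -- the word containing `index` lies in `rest`
        have hi'lt : i - (w.length + 1) < rest.length := by omega
        have hii : i = w.length + 1 + (i - (w.length + 1)) := by omega
        set i' := i - (w.length + 1) with hi'
        have hspr : rest[i']? ≠ some ' ' := by rw [← hgetr i', ← hii]; exact hsp
        have ihr := ih rest i' (by omega) hi'lt hspr
        set l' := pvFindLeftB rest i' with hl'
        set r' := pvFindRightB rest i' with hr'
        have hfrle := pvFR_le rest i' (le_of_lt hi'lt)
        have hfrge := pvFR_ge rest i'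
        have hflle := pvFL_le rest i'
        have hleft : pvFindLeftB (w ++ ' ' :: rest) i = w.length + 1 + l' := by
          apply pvFL_uniq
          · omega
          · intro j h1 h2
            rw [show j = w.length + 1 + (j - (w.length + 1)) by omega, hgetr]
            exact pvFL_no_space rest i' (j - (w.length + 1)) (by omega) (by omega)
          · right
            rcases Nat.eq_zero_or_pos l' with h0 | h0
            · rw [show w.length + 1 + l' - 1 = w.length by omega]
              exact hgetm
            · rcases pvFL_boundary rest i' with hb | hb
              · omega
              · rw [show w.length + 1 + l' - 1 = w.length + 1 + (l' - 1) by omega, hgetr]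
                exact hb
        have hright : pvFindRightB (w ++ ' ' :: rest) i = w.length + 1 + r' := by
          apply pvFR_uniq _ _ (by omega)
          · omega
          · omega
          · intro j h1 h2
            rw [show j = w.length + 1 + (j - (w.length + 1)) by omega, hgetr]
            exact pvFR_no_space rest i' (j - (w.length + 1)) (by omega) (by omega)
          · rcases pvFR_boundary rest i' (le_of_lt hi'lt) with hb | hb
            · left; omega
            · right; rw [hgetr]; exact hb
        have hstep : pvKeptW (i : Int) (w :: List.splitOn ' ' rest) 0 =
            w :: pvKeptW (i' : Int) (List.splitOn ' ' rest) 0 := by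
          simp only [pvKeptW]
          rw [if_pos (by push_cast; omega)]
          rw [show (0 : Int) + (w.length : Int) + 1 = 0 + ((w.length : Int) + 1) by ring,
            pvKept_shift]
          rw [show (i : Int) - ((w.length : Int) + 1) = (i' : Int) by push_cast; omega]
          simp
        rw [hsplit, hstep]
        by_cases hKsp : ' ' ∈ rest
        · -- `rest` still contains a space: A keeps a nonempty tail, B splices inside `rest`
          have hKne : pvKeptW (i' : Int) (List.splitOn ' ' rest) 0 ≠ [] := by
            obtain ⟨w2, rest2, hw2, hr2⟩ := pvDecomp rest hKsp
            rw [hr2, pvSplitOn_app ' ' w2 rest2 hw2]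
            intro hnil
            have hlen2 := pvKept_length (i' : Int) (w2 :: List.splitOn ' ' rest2) 0
            rw [hnil] at hlen2
            simp at hlen2
            exact pvSplitOn_ne_nil ' ' rest2 hlen2
          have hnot : ¬ (l' = 0 ∧ r' = rest.length) := by
            rintro ⟨h0, hlen0⟩
            apply pvNoMem rest _ hKsp
            intro j hj
            rcases Nat.lt_trichotomy j i' with hj2 | hj2 | hj2
            · exact pvFL_no_space rest i' j (by omega) hj2
            · subst hj2; exact hspr
            · exact pvFR_no_space rest i' j (by omega) (by omega)
          have hBC : pvBCore (w ++ ' ' :: rest) i = w ++ [' '] ++ pvBCore rest i' := by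
            simp only [pvBCore, hleft, hright]
            rw [if_pos (by omega)]
            rw [show w.length + 1 + l' - 1 = w.length + l' by omega]
            rw [List.take_append, List.take_of_length_le (by omega),
              List.drop_append, List.drop_eq_nil_of_le (by omega),
              show w.length + 1 + r' - w.length = r' + 1 by omega]
            simp only [List.drop_succ_cons, List.nil_append]
            rcases Nat.eq_zero_or_pos l' with h0 | h0
            · have hrlt : r' < rest.length := by omega
              rw [if_neg (by omega), if_pos hrlt]
              have hsp' : rest[r'] = ' ' := by
                rcases pvFR_boundary rest i' (le_of_lt hi'lt) with hb | hb
                · omega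
                · rw [List.getElem?_eq_getElem hrlt] at hb
                  exact Option.some.inj hb
              rw [h0, Nat.add_zero, Nat.sub_self, List.take_zero, List.append_nil,
                List.drop_eq_getElem_cons hrlt, hsp']
              simp
              omega
            · rw [if_pos h0]
              rw [show (w.length + l') - w.length = l' by omega]
              rw [show l' = (l' - 1) + 1 by omega, List.take_succ_cons]
              simp only [List.append_assoc, List.cons_append,
                List.nil_append]
              rw [← hl', ← hr']
          rw [hBC, ← ihr]
          obtain ⟨k0, K', hK⟩ : ∃ k0 K',
              pvKeptW (i' : Int) (List.splitOn ' ' rest) 0 = k0 :: K' := by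
            cases hc : pvKeptW (i' : Int) (List.splitOn ' ' rest) 0 with
            | nil => exact absurd hc hKne
            | cons k0 K' => exact ⟨k0, K', rfl⟩
          rw [hK, PySem.Chars.join_cons_cons]
        · -- no space in `rest`: A drops the only word of `rest`, B cuts the tail off at `w`
          have h0 : l' = 0 :=
            pvFL_uniq rest i' 0 (Nat.zero_le _)
              (fun j _ hj => fun hs => hKsp (List.mem_of_getElem? hs)) (Or.inl rfl)
          have hlen0 : r' = rest.length :=
            pvFR_uniq rest i' (le_of_lt hi'lt) rest.length (le_of_lt hi'lt) (le_refl _)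
              (fun j _ _ => fun hs => hKsp (List.mem_of_getElem? hs)) (Or.inl rfl)
          have hsp2 : List.splitOn ' ' rest = [rest] := pvSplitOn_no ' ' rest hKsp
          have hK : pvKeptW (i' : Int) (List.splitOn ' ' rest) 0 = [] := by
            rw [hsp2]
            simp only [pvKeptW]
            rw [if_neg (by push_cast; omega)]
            simp
          rw [hK, PySem.Chars.join_singleton]
          simp only [pvBCore, hleft, hright]
          rw [if_pos (by omega)]
          rw [show w.length + 1 + l' - 1 = w.length by omega]
          rw [List.take_append, List.take_of_length_le (le_refl _), Nat.sub_self,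
            List.take_zero, List.drop_append, List.drop_eq_nil_of_le (by omega),
            List.drop_eq_nil_of_le (by simp; omega)]
          simp
    · -- no space anywhere: A drops the only word, B cuts everything
      have hsplit : List.splitOn ' ' L = [L] := pvSplitOn_no ' ' L hmem
      have hleft : pvFindLeftB L i = 0 :=
        pvFL_uniq _ _ 0 (Nat.zero_le _)
          (fun j _ _ => fun hs => hmem (List.mem_of_getElem? hs)) (Or.inl rfl)
      have hright : pvFindRightB L i = L.length :=
        pvFR_uniq _ _ (by omega) L.length (by omega) (le_refl _)
          (fun j _ _ => fun hs => hmem (List.mem_of_getElem? hs)) (Or.inl rfl)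
      have hK : pvKeptW (i : Int) [L] 0 = [] := by
        simp only [pvKeptW]
        rw [if_neg (by push_cast; omega)]
        simp
      rw [hsplit, hK]
      simp only [pvBCore, hleft, hright]
      rw [if_neg (by omega), if_neg (by omega)]
      simp [PySem.Chars.join, List.intercalate]

-- ===== VERDICT (by name: the statement is the Claim_ definition above) =====
theorem pvSplitStr (article : String) :
    PySem.Str.split? article " " =
      some ((List.splitOn ' ' article.toList).map String.ofList) := by
  rw [PySem.Str.split?, show String.toList " " = [' '] from rfl]
  rw [PySem.Chars.split?, if_neg (by simp), pvSplit_eq]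
  rfl

theorem pvJoinKept (article : String) (index : Int) :
    (PySem.Str.join " "
        (pvKeptS index ((List.splitOn ' ' article.toList).map String.ofList) 0)).toList =
      PySem.Chars.join [' '] (pvKeptW index (List.splitOn ' ' article.toList) 0) := by
  rw [PySem.Str.toList_join, show String.toList " " = [' '] from rfl, pvKeptSW]
  congr 1
  rw [List.map_map]
  have : (String.toList ∘ String.ofList) = (fun l : List Char => l) := by
    funext l; simp [String.toList_ofList]
  rw [this, List.map_id']

theorem pvRoundTrip (L : List Char) :
    PySem.Chars.join [' '] (List.splitOn ' ' L) = L :=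
  List.intercalate_splitOn L ' '

theorem pvAltCore (article : String) (index : Int) (ch : Char)
    (hneg : ¬ index < 0) (hget : PySem.Str.pyGet? article index = some ch)
    (hch : ¬ ch = ' ') :
    deleteText_alt article index = String.ofList (pvBCore article.toList index.toNat) := by
  rw [deleteText_alt, if_neg hneg, hget]
  dsimp only
  rw [if_neg hch]
  rw [pvBCore]
  split_ifs <;> rfl

theorem deleteText_spec : Claim_equal_deleteText := by
  intro article index _ hpre
  unfold Spec_deleteText
  obtain ⟨h1, h2⟩ := hpre
  rcases lt_or_ge index 0 with hneg | hpos
  · -- negative index: A joins back every word, i.e. returns the article unchanged; B guards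
    rw [deleteText_alt, if_pos hneg]
    have hj : article.toList.length - (-index).toNat < article.toList.length := by omega
    have hget : PySem.Str.pyGet? article index =
        some (article.toList[article.toList.length - (-index).toNat]'hj) := by
      rw [PySem.Str.pyGet?_eq, PySem.Chars.pyGet?_eq_listPyGet?, PySem.List.pyGet?,
        PySem.List.pyIdx?, if_neg (by omega), if_pos (by omega)]
      simp [List.getElem?_eq_getElem hj]
    rw [deleteText, hget]
    dsimp only
    by_cases hch : article.toList[article.toList.length - (-index).toNat]'hj = ' '
    · rw [if_pos hch]
    · rw [if_neg hch, pvSplitStr]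
      simp only [pvFoldA]
      apply String.toList_inj.mp
      rw [List.nil_append, pvJoinKept, pvKept_all index _ 0 hneg, pvRoundTrip]
  · -- nonnegative index
    have hi : index.toNat < article.toList.length := by omega
    have hidx : index = (index.toNat : Int) := by omega
    have hget : PySem.Str.pyGet? article index =
        some (article.toList[index.toNat]'hi) := by
      rw [PySem.Str.pyGet?_eq, PySem.Chars.pyGet?_eq_listPyGet?, PySem.List.pyGet?,
        PySem.List.pyIdx?, if_pos (by omega), if_pos (by omega)]
      simp [List.getElem?_eq_getElem hi]
    rw [deleteText, hget]
    dsimp only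
    by_cases hch : article.toList[index.toNat]'hi = ' '
    · rw [if_pos hch, deleteText_alt, if_neg (by omega), hget]
      dsimp only
      rw [if_pos hch]
    · rw [if_neg hch, pvSplitStr]
      simp only [pvFoldA]
      rw [pvAltCore article index _ (by omega) hget hch]
      apply String.toList_inj.mp
      rw [List.nil_append, pvJoinKept, String.toList_ofList]
      rw [hidx]
      apply pvMainAux article.toList.length article.toList index.toNat (le_refl _) hi
      rw [List.getElem?_eq_getElem hi]
      simp [hch]
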